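-- pv_equiv track=rewrite | github.com/sourcecontrol-exe/HackerRank-Solutions | fisdom/bit.py | calculate
-- ===== SOURCE A (Python) =====
-- def calculate(p, q):
--
--     mod = 998244353
--     expo = mod - 2
--
--     # Loop to find the value
--     # until the expo is not zero
--     while (expo):
--
--         # Multiply p with q
--         # if expo is odd
--         if (expo & 1):
--             p = (p * q) % mod
--         q = (q * q) % mod
--
--         # Reduce the value of
--         # expo by 2
--         expo >>= 1
--
--     return p
-- ===== SOURCE B (Python) =====
-- def calculate(p, q):
--     mod = 998244353
--
--     def modpow(base, e):
--         if e == 0: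
--             return 1
--         h = modpow(base, e // 2)
--         sq = h * h % mod
--         return sq if e % 2 == 0 else sq * base % mod
--
--     return p * modpow(q, mod - 2) % mod
-- ===== Notes on version B (the rewrite author's own statement) =====
-- stated objective: alternative
-- what changed: Replaces A's iterative LSB-first binary-exponentiation loop (mutating p and q) by a recursive divide-and-conquer modpow on the halved exponent, multiplying by p and reducing mod once at the end.
import Mathlib
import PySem

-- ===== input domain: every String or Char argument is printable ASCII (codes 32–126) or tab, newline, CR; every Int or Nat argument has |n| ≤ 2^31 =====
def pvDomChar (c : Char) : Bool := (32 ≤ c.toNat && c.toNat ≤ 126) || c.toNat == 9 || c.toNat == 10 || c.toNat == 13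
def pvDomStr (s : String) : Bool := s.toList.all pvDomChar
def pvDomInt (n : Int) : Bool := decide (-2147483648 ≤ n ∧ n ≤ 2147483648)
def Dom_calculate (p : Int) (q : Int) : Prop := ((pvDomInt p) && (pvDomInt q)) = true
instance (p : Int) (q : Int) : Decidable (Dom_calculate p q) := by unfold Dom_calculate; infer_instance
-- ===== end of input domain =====

-- B replaces A's iterative LSB-first binary-exponentiation loop by a recursive
-- divide-and-conquer modpow, multiplying by p and reducing mod once at the end (alternative, same cost).


-- ===== PORT A =====
-- A's while loop over expo; expo is a nonnegative Python int, carried as a Nat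
-- (expo & 1 = e % 2, expo >>= 1 = e / 2; '%' on Int with positive modulus is
-- Lean's emod = Python's %).
def calcLoopA (p : Int) (q : Int) (e : Nat) : Int :=
  if e = 0 then p
  else
    let p' := if e % 2 = 1 then (p * q) % 998244353 else p
    calcLoopA p' ((q * q) % 998244353) (e / 2)
decreasing_by exact Nat.div_lt_self (Nat.pos_of_ne_zero (by assumption)) (by omega)

def calculate (p : Int) (q : Int) : Int := calcLoopA p q (998244353 - 2)

-- ===== PORT B =====
def modpowB (base : Int) (e : Nat) : Int :=
  if e = 0 then 1
  else
    let h := modpowB base (e / 2)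
    let sq := (h * h) % 998244353
    if e % 2 = 0 then sq else (sq * base) % 998244353
decreasing_by exact Nat.div_lt_self (Nat.pos_of_ne_zero (by assumption)) (by omega)

def calculate_alt (p : Int) (q : Int) : Int := (p * modpowB q (998244353 - 2)) % 998244353

-- ===== PRECONDITION & SPEC =====
def Spec_calculate (p : Int) (q : Int) (out : Int) : Prop := out = calculate_alt p q
instance (p : Int) (q : Int) (out : Int) : Decidable (Spec_calculate p q out) := by unfold Spec_calculate; infer_instance

-- ===== CLAIM (what is proved, stated in full; the proofs are below) =====
def Claim_equal_calculate : Prop := ∀ (p : Int) (q : Int), Dom_calculate p q → Spec_calculate p q (calculate p q)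

-- ===== LEMMAS AND PROOFS =====

theorem emod_pow_emod (a : Int) (k : Nat) (n : Int) : (a % n) ^ k % n = a ^ k % n := by
  induction k with
  | zero => simp
  | succ k ih =>
    rw [pow_succ, pow_succ, Int.mul_emod, ih, Int.emod_emod_of_dvd _ dvd_rfl, ← Int.mul_emod]

theorem modpowB_emod (e : Nat) (b : Int) :
    modpowB b e % 998244353 = b ^ e % 998244353 := by
  induction e using Nat.strong_induction_on with
  | _ e ih =>
    rw [modpowB]
    by_cases h0 : e = 0
    · simp [h0]
    · have ih2 := ih (e / 2) (Nat.div_lt_self (Nat.pos_of_ne_zero h0) (by omega))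
      simp only [h0, if_false]
      have key : (modpowB b (e / 2) * modpowB b (e / 2)) % 998244353
          = b ^ (e / 2 + e / 2) % 998244353 := by
        rw [Int.mul_emod, ih2, ← Int.mul_emod, ← pow_add]
      by_cases hpar : e % 2 = 0
      · simp only [hpar, if_true]
        have he : e / 2 + e / 2 = e := by omega
        rw [Int.emod_emod_of_dvd _ dvd_rfl, key, he]
      · simp only [hpar, if_false]
        have he : e / 2 + e / 2 + 1 = e := by omega
        rw [Int.emod_emod_of_dvd _ dvd_rfl, Int.mul_emod, Int.emod_emod_of_dvd _ dvd_rfl,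
          key, ← Int.mul_emod, ← pow_succ, he]

theorem calcLoopA_eq (e : Nat) (he : e ≠ 0) (p q : Int) :
    calcLoopA p q e = (p * q ^ e) % 998244353 := by
  induction e using Nat.strong_induction_on generalizing p q with
  | _ e ih =>
    rw [calcLoopA]
    simp only [he, if_false]
    by_cases h1 : e / 2 = 0
    · have he1 : e = 1 := by omega
      subst he1
      simp [calcLoopA]
    · have ih2 := ih (e / 2) (Nat.div_lt_self (Nat.pos_of_ne_zero he) (by omega)) h1
      rw [ih2]
      have hqq : ((q * q) % 998244353) ^ (e / 2) % 998244353 = q ^ (e / 2 + e / 2) % 998244353 := by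
        rw [emod_pow_emod, mul_pow, ← pow_add]
      by_cases hpar : e % 2 = 1
      · simp only [hpar, if_true]
        have he : e / 2 + e / 2 + 1 = e := by omega
        rw [Int.mul_emod, Int.emod_emod_of_dvd _ dvd_rfl, hqq, ← Int.mul_emod,
          mul_assoc, ← pow_succ', he]
      · simp only [hpar, if_false]
        have he : e / 2 + e / 2 = e := by omega
        rw [Int.mul_emod, hqq, ← Int.mul_emod, he]

-- ===== VERDICT (by name: the statement is the Claim_ definition above) =====
theorem calculate_spec : Claim_equal_calculate := by
  intro p q _
  unfold Spec_calculate calculate calculate_alt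
  rw [calcLoopA_eq _ (by norm_num)]
  conv_rhs => rw [Int.mul_emod, modpowB_emod, ← Int.mul_emod]
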